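-- pv_equiv track=rewrite | github.com/srinisvas/GuardLens | dataset_pipeline/src/build_dataset.py | obfuscate_text
-- ===== SOURCE A (Python) =====
-- def obfuscate_text(text):
--     replacements = {
--         "ignore": "1gn0r3",
--         "instructions": "1nstruct10ns",
--         "previous": "pr3v10us",
--         "disregard": "d1sr3g4rd"
--     }
--     for k, v in replacements.items():
--         text = text.replace(k, v)
--     return text
-- ===== SOURCE B (Python) =====
-- def obfuscate_text(text):
--     table = [("ignore", "1gn0r3"), ("instructions", "1nstruct10ns"),
--              ("previous", "pr3v10us"), ("disregard", "d1sr3g4rd")]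
--     out = []
--     i = 0
--     n = len(text)
--     while i < n:
--         for k, v in table:
--             if text.startswith(k, i):
--                 out.append(v)
--                 i += len(k)
--                 break
--         else:
--             out.append(text[i])
--             i += 1
--     return "".join(out)
-- ===== Notes on version B (the rewrite author's own statement) =====
-- stated objective: alternative
-- what changed: Replaces A's four sequential full-string replace passes by a single left-to-right scan that matches the keyword table at each position of the original string and emits the leetspeak value (safe because no keyword overlaps another and no replacement value creates a keyword).
import Mathlib
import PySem

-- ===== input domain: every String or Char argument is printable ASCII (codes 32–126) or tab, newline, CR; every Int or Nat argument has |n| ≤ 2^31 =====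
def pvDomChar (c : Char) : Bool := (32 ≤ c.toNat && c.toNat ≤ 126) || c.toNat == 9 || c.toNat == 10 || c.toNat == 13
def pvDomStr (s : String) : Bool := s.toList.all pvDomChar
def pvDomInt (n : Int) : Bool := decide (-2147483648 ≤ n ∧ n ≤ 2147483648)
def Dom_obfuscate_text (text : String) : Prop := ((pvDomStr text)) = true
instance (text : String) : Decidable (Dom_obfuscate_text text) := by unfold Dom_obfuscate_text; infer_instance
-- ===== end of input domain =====

-- B replaces A's four sequential full-string replace passes by ONE left-to-right scan of the
-- original string matching the keyword table at each position (objective: alternative algorithm).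

-- ===== PORT A =====
def obfuscate_text (text : String) : String :=
  let replacements : PySem.Dict String String :=
    PySem.Dict.mk [("ignore", "1gn0r3"), ("instructions", "1nstruct10ns"),
                   ("previous", "pr3v10us"), ("disregard", "d1sr3g4rd")]
  replacements.items.foldl (fun t kv => PySem.Str.replace t kv.1 kv.2) text

-- ===== PORT B =====
-- the keyword table (B's dict, in insertion order)
def pvTable : List (String × String) :=
  [("ignore", "1gn0r3"), ("instructions", "1nstruct10ns"),
   ("previous", "pr3v10us"), ("disregard", "d1sr3g4rd")]

-- B's inner `for k, v in replacements.items(): if text.startswith(k, i)` loop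
def pvMatch : List (String × String) → List Char → Option (List Char × List Char)
  | [], _ => none
  | (k, v) :: rest, l => if k.toList.isPrefixOf l then some (k.toList, v.toList) else pvMatch rest l

-- termination helper for scanB: any key the table matches is nonempty
theorem pvMatch_pvTable_len {l : List Char} {p : List Char × List Char}
    (h : pvMatch pvTable l = some p) : 1 ≤ p.1.length := by
  revert h
  simp only [pvTable, pvMatch]
  split_ifs <;> intro h <;> (try cases h) <;> simp_all

-- B's while-loop: one pass over the original string, emitting the value at each keyword match
def scanB (l : List Char) : List Char :=
  match l with
  | [] => []
  | c :: t =>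
    match h : pvMatch pvTable (c :: t) with
    | some (k, v) => v ++ scanB ((c :: t).drop k.length)
    | none => c :: scanB t
termination_by l.length
decreasing_by
  · have h1 : 1 ≤ k.length := pvMatch_pvTable_len h
    simp only [List.length_drop, List.length_cons]
    omega
  · simp

def obfuscate_text_alt (text : String) : String :=
  String.ofList (scanB text.toList)

-- ===== PRECONDITION & SPEC =====
def Spec_obfuscate_text (text : String) (out : String) : Prop := out = obfuscate_text_alt text
instance (text : String) (out : String) : Decidable (Spec_obfuscate_text text out) := by unfold Spec_obfuscate_text; infer_instance

-- ===== CLAIM (what is proved, stated in full; the proofs are below) =====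
def Claim_equal_obfuscate_text : Prop := ∀ (text : String), Dom_obfuscate_text text → Spec_obfuscate_text text (obfuscate_text text)

-- ===== LEMMAS AND PROOFS =====

-- rep old new s = Python s.replace(old, new) for old ≠ [], as a plain structural recursion
def rep (old new : List Char) : List Char → List Char
  | [] => []
  | c :: t =>
    if old.isPrefixOf (c :: t) ∧ old ≠ [] then new ++ rep old new ((c :: t).drop old.length)
    else c :: rep old new t
termination_by l => l.length
decreasing_by
  · rename_i h
    have : old.length ≠ 0 := by simpa using h.2
    simp only [List.length_drop, List.length_cons]
    omega
  · simp

theorem rep_cons_nomatch {old : List Char} (new : List Char) {c : Char} {t : List Char}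
    (h : ¬ old <+: (c :: t)) : rep old new (c :: t) = c :: rep old new t := by
  rw [rep, if_neg]
  simp [h]

theorem rep_cons_match {old : List Char} (new : List Char) {c : Char} {t : List Char}
    (h : old <+: (c :: t)) (hne : old ≠ []) :
    rep old new (c :: t) = new ++ rep old new ((c :: t).drop old.length) := by
  rw [rep, if_pos]
  exact ⟨List.isPrefixOf_iff_prefix.mpr h, hne⟩

theorem go_spec (old new : List Char) (hold : old ≠ []) :
    ∀ fuel l acc, l.length ≤ fuel →
      PySem.Chars.replace.go old new fuel l acc = acc.reverse ++ rep old new l := by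
  intro fuel
  induction fuel with
  | zero =>
    intro l acc h
    have hl : l = [] := by cases l <;> simp_all
    subst hl
    simp [PySem.Chars.replace.go, rep]
  | succ n ih =>
    intro l acc h
    cases l with
    | nil => simp [PySem.Chars.replace.go, rep]
    | cons c t =>
      rw [PySem.Chars.replace.go]
      by_cases hp : old.isPrefixOf (c :: t)
      · rw [if_pos hp]
        have h1 : 0 < old.length := List.length_pos_iff.mpr hold
        have hlen : ((c :: t).drop old.length).length ≤ n := by
          simp only [List.length_drop, List.length_cons]
          simp only [List.length_cons] at h
          omega
        rw [ih _ _ hlen, rep_cons_match new (List.isPrefixOf_iff_prefix.mp hp) hold]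
        simp
      · rw [if_neg hp]
        rw [ih t (c :: acc) (by simp only [List.length_cons] at h; omega)]
        rw [rep_cons_nomatch new (fun hc => hp (List.isPrefixOf_iff_prefix.mpr hc))]
        simp

theorem replace_eq_rep (old new s : List Char) (hold : old ≠ []) :
    PySem.Chars.replace s old new = rep old new s := by
  rw [PySem.Chars.replace, if_neg (by simpa using hold)]
  simpa using go_spec old new hold s.length s [] le_rfl

theorem prefix_append_cases {k x t : List Char} (h : k <+: x ++ t) : x <+: k ∨ k <+: x := by
  induction x generalizing k with
  | nil => exact Or.inl (List.nil_prefix)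
  | cons c x' ih =>
    cases k with
    | nil => exact Or.inr List.nil_prefix
    | cons a k' =>
      obtain ⟨l', hl, hp⟩ := List.cons_prefix_iff.mp h
      obtain ⟨rfl, rfl⟩ : a = c ∧ l' = x' ++ t := by
        constructor <;> [skip; skip] <;> simp_all
      rcases ih hp with h1 | h1
      · exact Or.inl (List.cons_prefix_cons.mpr ⟨rfl, h1⟩)
      · exact Or.inr (List.cons_prefix_cons.mpr ⟨rfl, h1⟩)

theorem rep_append_self (old new t : List Char) (hne : old ≠ []) :
    rep old new (old ++ t) = new ++ rep old new t := by
  obtain ⟨c, os, rfl⟩ : ∃ c os, old = c :: os := by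
    cases old with
    | nil => exact absurd rfl hne
    | cons c os => exact ⟨c, os, rfl⟩
  rw [show (c :: os) ++ t = c :: (os ++ t) by simp]
  rw [rep_cons_match new (by simpa using List.prefix_append (c :: os) t) hne]
  congr 1
  congr 1
  rw [show c :: (os ++ t) = (c :: os) ++ t by simp]
  exact List.drop_left

theorem rep_append_of_safe (old new w : List Char) (hne : old ≠ [])
    (hw : ∀ i < w.length, ¬ (w.drop i <+: old) ∧ ¬ (old <+: w.drop i)) :
    ∀ t, rep old new (w ++ t) = w ++ rep old new t := by
  induction w with
  | nil => intro t; simp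
  | cons c w' ih =>
    intro t
    have h0 := hw 0 (by simp)
    simp only [List.drop_zero] at h0
    have hnp : ¬ old <+: (c :: (w' ++ t)) := by
      intro hk
      rcases prefix_append_cases (t := t) (x := c :: w') (by simpa using hk) with h1 | h1
      · exact h0.1 h1
      · exact h0.2 h1
    rw [show (c :: w') ++ t = c :: (w' ++ t) by simp, rep_cons_nomatch new hnp]
    rw [ih (fun i hi => by simpa using hw (i + 1) (by simpa using Nat.succ_lt_succ hi)) t]
    simp

theorem rep_no_create (old new K : List Char)
    (hv : ∀ j < K.length, ¬ (K.drop j <+: new) ∧ ¬ (new <+: K.drop j)) :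
    ∀ s j, j < K.length → K.drop j <+: rep old new s → K.drop j <+: s := by
  intro s
  induction s with
  | nil =>
    intro j hj hpre
    rw [rep] at hpre
    have : K.drop j = [] := List.prefix_nil.mp hpre
    have h2 : K.length - j = 0 := by
      have := congrArg List.length this
      simpa using this
    omega
  | cons c t ih =>
    intro j hj hpre
    rw [rep] at hpre
    split_ifs at hpre with hcond
    · rcases prefix_append_cases hpre with h1 | h1
      · exact absurd h1 (hv j hj).2
      · exact absurd h1 (hv j hj).1
    · rw [List.drop_eq_getElem_cons hj] at hpre ⊢
      obtain ⟨l', hl, hp⟩ := List.cons_prefix_iff.mp hpre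
      obtain ⟨rfl, rfl⟩ : K[j] = c ∧ l' = rep old new t := by
        constructor <;> simp_all
      by_cases hj1 : j + 1 < K.length
      · exact List.cons_prefix_cons.mpr ⟨rfl, ih (j + 1) hj1 hp⟩
      · have : K.drop (j + 1) = [] := List.drop_eq_nil_of_le (by omega)
        rw [this]
        exact List.cons_prefix_cons.mpr ⟨rfl, List.nil_prefix⟩


theorem scanB_eq (c : Char) (t : List Char) : scanB (c :: t) =
    if "ignore".toList <+: (c :: t) then "1gn0r3".toList ++ scanB ((c :: t).drop 6)
    else if "instructions".toList <+: (c :: t) then "1nstruct10ns".toList ++ scanB ((c :: t).drop 12)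
    else if "previous".toList <+: (c :: t) then "pr3v10us".toList ++ scanB ((c :: t).drop 8)
    else if "disregard".toList <+: (c :: t) then "d1sr3g4rd".toList ++ scanB ((c :: t).drop 9)
    else c :: scanB t := by
  rw [scanB]
  split
  case _ k v heq =>
    revert heq
    simp only [pvMatch, pvTable, List.isPrefixOf_iff_prefix]
    split_ifs with h1 h2 h3 h4 <;> intro heq <;> cases heq <;> simp_all
  case _ heq =>
    revert heq
    simp only [pvMatch, pvTable, List.isPrefixOf_iff_prefix]
    split_ifs with h1 h2 h3 h4 <;> intro heq <;> simp_all

theorem comp_eq_scanB : ∀ n l, l.length ≤ n →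
    rep "disregard".toList "d1sr3g4rd".toList (rep "previous".toList "pr3v10us".toList
      (rep "instructions".toList "1nstruct10ns".toList
        (rep "ignore".toList "1gn0r3".toList l))) = scanB l := by
  intro n
  induction n with
  | zero =>
    intro l h
    have hl : l = [] := by cases l <;> simp_all
    subst hl
    simp [rep, scanB]
  | succ n ih =>
    intro l h
    cases l with
    | nil => simp [rep, scanB]
    | cons c t =>
      rw [scanB_eq]
      by_cases h1 : "ignore".toList <+: (c :: t)
      · rw [if_pos h1]
        obtain ⟨t1, ht⟩ := h1
        have hlen : t1.length ≤ n := by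
          have := congrArg List.length ht
          simp only [List.length_append, List.length_cons] at this h
          simp only [show "ignore".toList.length = 6 from by decide] at this
          omega
        rw [← ht]
        rw [rep_append_self _ _ _ (by decide)]
        rw [rep_append_of_safe "instructions".toList "1nstruct10ns".toList "1gn0r3".toList (by decide) (by decide)]
        rw [rep_append_of_safe "previous".toList "pr3v10us".toList "1gn0r3".toList (by decide) (by decide)]
        rw [rep_append_of_safe "disregard".toList "d1sr3g4rd".toList "1gn0r3".toList (by decide) (by decide)]
        rw [show (6 : Nat) = "ignore".toList.length from by decide, List.drop_left]
        rw [ih t1 hlen]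
      · rw [if_neg h1]
        by_cases h2 : "instructions".toList <+: (c :: t)
        · rw [if_pos h2]
          obtain ⟨t2, ht⟩ := h2
          have hlen : t2.length ≤ n := by
            have := congrArg List.length ht
            simp only [List.length_append, List.length_cons] at this h
            simp only [show "instructions".toList.length = 12 from by decide] at this
            omega
          rw [← ht]
          rw [rep_append_of_safe "ignore".toList "1gn0r3".toList "instructions".toList (by decide) (by decide)]
          rw [rep_append_self _ _ _ (by decide)]
          rw [rep_append_of_safe "previous".toList "pr3v10us".toList "1nstruct10ns".toList (by decide) (by decide)]
          rw [rep_append_of_safe "disregard".toList "d1sr3g4rd".toList "1nstruct10ns".toList (by decide) (by decide)]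
          rw [show (12 : Nat) = "instructions".toList.length from by decide, List.drop_left]
          rw [ih t2 hlen]
        · rw [if_neg h2]
          by_cases h3 : "previous".toList <+: (c :: t)
          · rw [if_pos h3]
            obtain ⟨t3, ht⟩ := h3
            have hlen : t3.length ≤ n := by
              have := congrArg List.length ht
              simp only [List.length_append, List.length_cons] at this h
              simp only [show "previous".toList.length = 8 from by decide] at this
              omega
            rw [← ht]
            rw [rep_append_of_safe "ignore".toList "1gn0r3".toList "previous".toList (by decide) (by decide)]
            rw [rep_append_of_safe "instructions".toList "1nstruct10ns".toList "previous".toList (by decide) (by decide)]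
            rw [rep_append_self _ _ _ (by decide)]
            rw [rep_append_of_safe "disregard".toList "d1sr3g4rd".toList "pr3v10us".toList (by decide) (by decide)]
            rw [show (8 : Nat) = "previous".toList.length from by decide, List.drop_left]
            rw [ih t3 hlen]
          · rw [if_neg h3]
            by_cases h4 : "disregard".toList <+: (c :: t)
            · rw [if_pos h4]
              obtain ⟨t4, ht⟩ := h4
              have hlen : t4.length ≤ n := by
                have := congrArg List.length ht
                simp only [List.length_append, List.length_cons] at this h
                simp only [show "disregard".toList.length = 9 from by decide] at this
                omega
              rw [← ht]
              rw [rep_append_of_safe "ignore".toList "1gn0r3".toList "disregard".toList (by decide) (by decide)]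
              rw [rep_append_of_safe "instructions".toList "1nstruct10ns".toList "disregard".toList (by decide) (by decide)]
              rw [rep_append_of_safe "previous".toList "pr3v10us".toList "disregard".toList (by decide) (by decide)]
              rw [rep_append_self _ _ _ (by decide)]
              rw [show (9 : Nat) = "disregard".toList.length from by decide, List.drop_left]
              rw [ih t4 hlen]
            · rw [if_neg h4]
              have hlen : t.length ≤ n := by simp only [List.length_cons] at h; omega
              have e1 : rep "ignore".toList "1gn0r3".toList (c :: t)
                  = c :: rep "ignore".toList "1gn0r3".toList t := rep_cons_nomatch _ h1
              have n2 : ¬ "instructions".toList <+: rep "ignore".toList "1gn0r3".toList (c :: t) := by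
                intro hc
                have := rep_no_create "ignore".toList "1gn0r3".toList "instructions".toList
                  (by decide) (c :: t) 0 (by decide) (by simpa using hc)
                exact h2 (by simpa using this)
              have e2 : rep "instructions".toList "1nstruct10ns".toList
                    (rep "ignore".toList "1gn0r3".toList (c :: t))
                  = c :: rep "instructions".toList "1nstruct10ns".toList
                      (rep "ignore".toList "1gn0r3".toList t) := by
                rw [e1] at n2 ⊢
                exact rep_cons_nomatch _ n2
              have n3 : ¬ "previous".toList <+: rep "instructions".toList "1nstruct10ns".toList
                  (rep "ignore".toList "1gn0r3".toList (c :: t)) := by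
                intro hc
                have s1 := rep_no_create "instructions".toList "1nstruct10ns".toList "previous".toList
                  (by decide) (rep "ignore".toList "1gn0r3".toList (c :: t)) 0 (by decide) (by simpa using hc)
                have s2 := rep_no_create "ignore".toList "1gn0r3".toList "previous".toList
                  (by decide) (c :: t) 0 (by decide) (by simpa using s1)
                exact h3 (by simpa using s2)
              have e3 : rep "previous".toList "pr3v10us".toList
                    (rep "instructions".toList "1nstruct10ns".toList
                      (rep "ignore".toList "1gn0r3".toList (c :: t)))
                  = c :: rep "previous".toList "pr3v10us".toList
                      (rep "instructions".toList "1nstruct10ns".toList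
                        (rep "ignore".toList "1gn0r3".toList t)) := by
                rw [e2] at n3 ⊢
                exact rep_cons_nomatch _ n3
              have n4 : ¬ "disregard".toList <+: rep "previous".toList "pr3v10us".toList
                  (rep "instructions".toList "1nstruct10ns".toList
                    (rep "ignore".toList "1gn0r3".toList (c :: t))) := by
                intro hc
                have s1 := rep_no_create "previous".toList "pr3v10us".toList "disregard".toList
                  (by decide) (rep "instructions".toList "1nstruct10ns".toList
                    (rep "ignore".toList "1gn0r3".toList (c :: t))) 0 (by decide) (by simpa using hc)
                have s2 := rep_no_create "instructions".toList "1nstruct10ns".toList "disregard".toList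
                  (by decide) (rep "ignore".toList "1gn0r3".toList (c :: t)) 0 (by decide) (by simpa using s1)
                have s3 := rep_no_create "ignore".toList "1gn0r3".toList "disregard".toList
                  (by decide) (c :: t) 0 (by decide) (by simpa using s2)
                exact h4 (by simpa using s3)
              have e4 : rep "disregard".toList "d1sr3g4rd".toList
                    (rep "previous".toList "pr3v10us".toList
                      (rep "instructions".toList "1nstruct10ns".toList
                        (rep "ignore".toList "1gn0r3".toList (c :: t))))
                  = c :: rep "disregard".toList "d1sr3g4rd".toList
                      (rep "previous".toList "pr3v10us".toList
                        (rep "instructions".toList "1nstruct10ns".toList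
                          (rep "ignore".toList "1gn0r3".toList t))) := by
                rw [e3] at n4 ⊢
                exact rep_cons_nomatch _ n4
              rw [e4, ih t hlen]

-- ===== VERDICT (by name: the statement is the Claim_ definition above) =====
theorem obfuscate_text_spec : Claim_equal_obfuscate_text := by
  intro text _
  unfold Spec_obfuscate_text obfuscate_text obfuscate_text_alt
  simp only [List.foldl, PySem.Str.replace, String.toList_ofList]
  rw [replace_eq_rep _ _ _ (by decide), replace_eq_rep _ _ _ (by decide),
      replace_eq_rep _ _ _ (by decide), replace_eq_rep _ _ _ (by decide)]
  exact congrArg String.ofList (comp_eq_scanB text.toList.length text.toList le_rfl)
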